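-- pv_equiv track=rewrite | github.com/elisabm99/oscillate | oscillate.py | initialize_couplings
-- ===== SOURCE A (Python) =====
-- def initialize_couplings(lamb, M):
--     # Initialize coupling constants
--     # Rules hard coded in this initialization
--     # - Conservation of energy with the energy of a level j being w_j = j*w_1
--     # - *NOT* force lambda to be zero if i=j or k=l
--     lambdas = {}
--     for i in range(M):
--         for j in range(i, M):
--             for k in range(M):
--                 for l in range(k, M):
--                     if (i,j) == (k,l):
--                         continue
--                     if i + j == k + l:
--                         if (k, l, i, j) in lambdas.keys():
--                             continue
--                         lambdas[(i, j, k, l)] = lamb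
--     return lambdas
-- ===== SOURCE B (Python) =====
-- def initialize_couplings(lamb, M):
--     # For each outer pair (i, j), directly generate the inner pairs (k, l)
--     # with k + l == i + j: k runs over (i, (i+j)//2] and l = i+j-k.
--     lambdas = {}
--     for i in range(M):
--         for j in range(i, M):
--             s = i + j
--             for k in range(i + 1, s // 2 + 1):
--                 lambdas[(i, j, k, s - k)] = lamb
--     return lambdas
-- ===== Notes on version B (the rewrite author's own statement) =====
-- stated objective: faster
-- what changed: Instead of scanning all O(M^2) inner pairs per outer pair and filtering by sum equality plus a reverse-key membership test in the dict, B directly enumerates for each outer pair (i,j) the inner first indices k in (i,(i+j)//2], which are exactly the keys A keeps, so the inner double scan and the dict membership test disappear.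
import Mathlib
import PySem

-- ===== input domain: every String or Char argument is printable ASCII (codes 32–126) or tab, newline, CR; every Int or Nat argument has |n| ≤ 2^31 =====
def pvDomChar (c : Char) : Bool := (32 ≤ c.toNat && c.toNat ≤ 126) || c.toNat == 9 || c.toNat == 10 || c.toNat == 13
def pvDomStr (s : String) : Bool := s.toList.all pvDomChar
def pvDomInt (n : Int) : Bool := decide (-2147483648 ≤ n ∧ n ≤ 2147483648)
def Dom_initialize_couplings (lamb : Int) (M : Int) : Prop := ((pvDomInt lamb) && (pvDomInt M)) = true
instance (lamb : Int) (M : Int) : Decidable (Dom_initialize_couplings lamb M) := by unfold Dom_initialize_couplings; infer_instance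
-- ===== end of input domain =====

-- B replaces A's O(M^2) filtered inner scan per outer pair by directly generating
-- the matching inner pairs, which removes the dict membership test (objective: faster).

-- ===== PORT A =====
def initialize_couplings (lamb : Int) (M : Int) : List (List Int × Int) :=
  ((PySem.List.pyRange 0 M 1).foldl (fun d i =>
    (PySem.List.pyRange i M 1).foldl (fun d j =>
      (PySem.List.pyRange 0 M 1).foldl (fun d k =>
        (PySem.List.pyRange k M 1).foldl (fun d l =>
          if (i, j) = (k, l) then d
          else if i + j = k + l then
            (if d.contains [k, l, i, j] then d else d.insert [i, j, k, l] lamb)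
          else d) d) d) d)
    (PySem.Dict.empty : PySem.Dict (List Int) Int)).items

-- ===== PORT B =====
def initialize_couplings_alt (lamb : Int) (M : Int) : List (List Int × Int) :=
  ((PySem.List.pyRange 0 M 1).foldl (fun d i =>
    (PySem.List.pyRange i M 1).foldl (fun d j =>
      (PySem.List.pyRange (i + 1) (PySem.Int.floordiv (i + j) 2 + 1) 1).foldl (fun d k =>
        d.insert [i, j, k, i + j - k] lamb) d) d)
    (PySem.Dict.empty : PySem.Dict (List Int) Int)).items

-- ===== PRECONDITION & SPEC =====
def Spec_initialize_couplings (lamb : Int) (M : Int) (out : List (List Int × Int)) : Prop := out = initialize_couplings_alt lamb M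
instance (lamb : Int) (M : Int) (out : List (List Int × Int)) : Decidable (Spec_initialize_couplings lamb M out) := by unfold Spec_initialize_couplings; infer_instance

-- ===== CLAIM (what is proved, stated in full; the proofs are below) =====
def Claim_equal_initialize_couplings : Prop := ∀ (lamb : Int) (M : Int), Dom_initialize_couplings lamb M → Spec_initialize_couplings lamb M (initialize_couplings lamb M)

-- ===== LEMMAS AND PROOFS =====

-- invariant: the dict's keys are exactly the entries produced by the outer pairs
-- lexicographically before (i, j)
def KeyInv (M i j : Int) (d : PySem.Dict (List Int) Int) : Prop :=
  ∀ q, q ∈ d.keys ↔ ∃ a b c : Int, 0 ≤ a ∧ a ≤ b ∧ b < M ∧ (a < i ∨ (a = i ∧ b < j)) ∧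
    a < c ∧ c + c ≤ a + b ∧ q = [a, b, c, a + b - c]

-- what A's membership test answers while the outer pair is (i, j)
def Hq (M i j : Int) (d : PySem.Dict (List Int) Int) : Prop :=
  ∀ k l : Int, 0 ≤ k → k ≤ l → l < M → ¬(k = i ∧ l = j) → k + l = i + j →
    d.contains [k, l, i, j] = decide (k < i)

lemma foldl_fix {σ : Type} (f : σ → Int → σ) (l : List Int) (d : σ)
    (hid : ∀ s a, a ∈ l → f s a = s) : l.foldl f d = d := by
  induction l generalizing d with
  | nil => rfl
  | cons a l ih =>
    simp only [List.foldl_cons, hid d a (by simp)]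
    exact ih d (fun s b hb => hid s b (by simp [hb]))

lemma foldl_eq_single {σ : Type} (f : σ → Int → σ) (t : Int) (l : List Int) (d : σ)
    (hnd : l.Nodup) (hid : ∀ s a, a ∈ l → a ≠ t → f s a = s) :
    l.foldl f d = if t ∈ l then f d t else d := by
  induction l generalizing d with
  | nil => simp
  | cons a l ih =>
    by_cases ha : a = t
    · subst ha
      have hnotmem : a ∉ l := (List.nodup_cons.mp hnd).1
      simp only [List.foldl_cons, List.mem_cons, true_or, if_true]
      exact foldl_fix f l (f d a) (fun s b hb => hid s b (by simp [hb])
        (fun hbt => hnotmem (hbt ▸ hb)))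
    · have hfa : f d a = d := hid d a (by simp) ha
      have ha' : t ≠ a := Ne.symm ha
      rw [List.foldl_cons, hfa, ih d (List.nodup_cons.mp hnd).2
        (fun s b hb hbt => hid s b (by simp [hb]) hbt)]
      simp [List.mem_cons, ha']

lemma pyRange_nil (a b : Int) (h : b ≤ a) : PySem.List.pyRange a b 1 = [] := by
  rw [PySem.List.pyRange_one]
  have : (b - a).toNat = 0 := by omega
  simp [this]

lemma pyRange_filter (hi b : Int) : ∀ (n : Nat) (a lo : Int), (b - a).toNat = n →
    a ≤ lo → hi ≤ b →
    (PySem.List.pyRange a b 1).filter (fun k => decide (lo ≤ k ∧ k < hi)) =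
      PySem.List.pyRange lo hi 1 := by
  intro n
  induction n with
  | zero =>
    intro a lo hn h1 h2
    rw [pyRange_nil a b (by omega), pyRange_nil lo hi (by omega)]
    rfl
  | succ n ih =>
    intro a lo hn h1 h2
    have hab : a < b := by omega
    rw [PySem.List.pyRange_one_cons hab]
    by_cases hlo : a < lo
    · rw [List.filter_cons_of_neg (by simp only [decide_eq_true_eq, not_and]; omega)]
      exact ih (a + 1) lo (by omega) (by omega) h2
    · have ha : lo = a := by omega
      subst ha
      by_cases hhi : lo < hi
      · have hcg : (PySem.List.pyRange (lo + 1) b 1).filter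
            (fun k => decide (lo ≤ k ∧ k < hi)) =
            (PySem.List.pyRange (lo + 1) b 1).filter
            (fun k => decide (lo + 1 ≤ k ∧ k < hi)) :=
          List.filter_congr (fun k hk => by
            have := (PySem.List.mem_pyRange_one).mp hk
            simp only [decide_eq_decide]; omega)
        rw [List.filter_cons_of_pos (by simp only [decide_eq_true_eq]; omega),
          PySem.List.pyRange_one_cons hhi, hcg,
          ih (lo + 1) (lo + 1) (by omega) le_rfl h2]
      · rw [List.filter_cons_of_neg (by simp only [decide_eq_true_eq, not_and]; omega),
          List.filter_eq_nil_iff.mpr (fun k hk => by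
            have := (PySem.List.mem_pyRange_one).mp hk
            simp only [decide_eq_true_eq, not_and]; omega),
          pyRange_nil lo hi (by omega)]

-- collapse of A's innermost l-loop: at most one l can match the sum
lemma lLoop_eq (lamb M i j k : Int) (d : PySem.Dict (List Int) Int)
    (hk : 0 ≤ k) (hq : Hq M i j d) :
    (PySem.List.pyRange k M 1).foldl (fun d l =>
        if (i, j) = (k, l) then d
        else if i + j = k + l then
          (if d.contains [k, l, i, j] then d else d.insert [i, j, k, l] lamb)
        else d) d =
      if i < k ∧ k + k ≤ i + j ∧ i + j - k < M then
        d.insert [i, j, k, i + j - k] lamb else d := by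
  set t : Int := i + j - k with ht
  rw [foldl_eq_single _ t _ _ (PySem.List.nodup_pyRange_one k M)
    (fun s l hl hlt => by
      have hsum : ¬ (i + j = k + l) := by omega
      simp [hsum])]
  by_cases hmem : t ∈ PySem.List.pyRange k M 1
  · have hb := (PySem.List.mem_pyRange_one).mp hmem
    rw [if_pos hmem]
    by_cases hki : k = i
    · have htj : t = j := by omega
      rw [if_pos (by rw [hki, htj]), if_neg (by omega)]
    · rw [if_neg (by intro h; exact hki (by injection h with h1 h2; omega)),
        if_pos (by omega)]
      rw [hq k t hk hb.1 hb.2 (fun h => hki h.1) (by omega)]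
      by_cases hik : i < k
      · rw [if_neg (by simp; omega), if_pos (by omega)]
      · rw [if_pos (by simp; omega), if_neg (by omega)]
  · rw [if_neg hmem, if_neg (fun h => hmem ((PySem.List.mem_pyRange_one).mpr (by omega)))]

-- Hq is stable under the inserts A performs while the outer pair is (i, j)
lemma hq_insert (lamb M i j c : Int) (d : PySem.Dict (List Int) Int)
    (hq : Hq M i j d) : Hq M i j (d.insert [i, j, c, i + j - c] lamb) := by
  intro k l h0 h1 h2 hne hsum
  rw [PySem.Dict.contains_insert]
  have : ([k, l, i, j] == [i, j, c, i + j - c]) = false := by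
    simp only [beq_eq_false_iff_ne, ne_eq]
    intro h
    injection h with e1 h; injection h with e2 h
    exact hne ⟨e1, e2⟩
  rw [this, Bool.false_or]
  exact hq k l h0 h1 h2 hne hsum

-- A's k-loop rewritten as a conditional single-insert loop
lemma kLoop_eq (lamb M i j : Int) : ∀ (ks : List Int) (d : PySem.Dict (List Int) Int),
    Hq M i j d → (∀ k ∈ ks, 0 ≤ k) →
    ks.foldl (fun d k =>
      (PySem.List.pyRange k M 1).foldl (fun d l =>
        if (i, j) = (k, l) then d
        else if i + j = k + l then
          (if d.contains [k, l, i, j] then d else d.insert [i, j, k, l] lamb)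
        else d) d) d =
    ks.foldl (fun d k =>
      if i < k ∧ k + k ≤ i + j ∧ i + j - k < M then
        d.insert [i, j, k, i + j - k] lamb else d) d := by
  intro ks
  induction ks with
  | nil => intro d _ _; rfl
  | cons k ks ih =>
    intro d hq hpos
    rw [List.foldl_cons, List.foldl_cons,
      lLoop_eq lamb M i j k d (hpos k (by simp)) hq]
    by_cases hc : i < k ∧ k + k ≤ i + j ∧ i + j - k < M
    · simp only [if_pos hc]
      exact ih _ (hq_insert lamb M i j k d hq) (fun b hb => hpos b (by simp [hb]))
    · simp only [if_neg hc]
      exact ih _ hq (fun b hb => hpos b (by simp [hb]))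

-- the membership answers follow from the key invariant
lemma hq_of_inv (M i j : Int) (d : PySem.Dict (List Int) Int)
    (hij : i ≤ j) (hinv : KeyInv M i j d) : Hq M i j d := by
  intro k l h0 h1 h2 hne hsum
  have hmem := hinv [k, l, i, j]
  by_cases hki : k < i
  · simp only [hki, decide_true]
    rw [← PySem.Dict.contains_iff_mem_keys] at hmem
    rw [hmem.mpr ⟨k, l, i, h0, h1, h2, Or.inl hki, hki, by omega, by simp; omega⟩]
  · simp only [hki, decide_false]
    rw [← PySem.Dict.contains_iff_mem_keys] at hmem
    rw [Bool.eq_false_iff]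
    intro hcon
    obtain ⟨a, b, c, ha0, hab, hbM, hfr, hac, hcc, heq⟩ := hmem.mp hcon
    have e1 : a = k := by injection heq with e h; exact e.symm
    have e2 : b = l := by injection heq with _ h; injection h with e _; exact e.symm
    have e3 : c = i := by
      injection heq with _ h; injection h with _ h; injection h with e _; exact e.symm
    have e4 : a + b - c = j := by
      injection heq with _ h; injection h with _ h; injection h with _ h
      injection h with e _; exact e.symm
    rcases hfr with h | h
    · omega
    · exact hne ⟨by omega, by omega⟩

-- inner-loop equality: A's filtered double scan equals B's direct generation
lemma inner_eq (lamb M i j : Int) (d : PySem.Dict (List Int) Int)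
    (hi : 0 ≤ i) (hij : i ≤ j) (hj : j < M) (hq : Hq M i j d) :
    (PySem.List.pyRange 0 M 1).foldl (fun d k =>
      (PySem.List.pyRange k M 1).foldl (fun d l =>
        if (i, j) = (k, l) then d
        else if i + j = k + l then
          (if d.contains [k, l, i, j] then d else d.insert [i, j, k, l] lamb)
        else d) d) d =
    (PySem.List.pyRange (i + 1) (PySem.Int.floordiv (i + j) 2 + 1) 1).foldl (fun d k =>
      d.insert [i, j, k, i + j - k] lamb) d := by
  rw [kLoop_eq lamb M i j _ d hq
    (fun k hk => ((PySem.List.mem_pyRange_one).mp hk).1)]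
  have hfd : ∀ k : Int, (k ≤ PySem.Int.floordiv (i + j) 2) ↔ k * 2 ≤ i + j :=
    fun k => PySem.Int.le_floordiv_iff_mul_le (by omega)
  have hstep : (PySem.List.pyRange 0 M 1).foldl (fun d k =>
      if i < k ∧ k + k ≤ i + j ∧ i + j - k < M then
        d.insert [i, j, k, i + j - k] lamb else d) d =
    (PySem.List.pyRange 0 M 1).foldl (fun d k =>
      if (fun k : Int => decide (i + 1 ≤ k ∧ k < PySem.Int.floordiv (i + j) 2 + 1)) k = true then
        d.insert [i, j, k, i + j - k] lamb else d) d := by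
    apply PySem.List.foldl_congr_mem
    intro s k hk
    have hkb := (PySem.List.mem_pyRange_one).mp hk
    have := hfd k
    by_cases hc : i < k ∧ k + k ≤ i + j ∧ i + j - k < M
    · rw [if_pos hc, if_pos (by simp; omega)]
    · rw [if_neg hc, if_neg (by simp; omega)]
  rw [hstep, ← List.foldl_filter,
    pyRange_filter (PySem.Int.floordiv (i + j) 2 + 1) M (M - 0).toNat 0 (i + 1) rfl (by omega)
      (by have := (PySem.Int.floordiv_lt_iff_lt_mul (a := i + j) (b := 2) (q := j + 1)
            (by omega)).mpr (by omega); omega)]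

-- the key invariant advances across one outer pair (i, j)
lemma inv_step (lamb M i j : Int) (d : PySem.Dict (List Int) Int)
    (hi : 0 ≤ i) (hij : i ≤ j) (hj : j < M)
    (hinv : KeyInv M i j d) (hnd : d.keys.Nodup) :
    KeyInv M i (j + 1)
      ((PySem.List.pyRange (i + 1) (PySem.Int.floordiv (i + j) 2 + 1) 1).foldl
        (fun d k => d.insert [i, j, k, i + j - k] lamb) d) ∧
    ((PySem.List.pyRange (i + 1) (PySem.Int.floordiv (i + j) 2 + 1) 1).foldl
      (fun d k => d.insert [i, j, k, i + j - k] lamb) d).keys.Nodup := by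
  have hfd : ∀ k : Int, (k ≤ PySem.Int.floordiv (i + j) 2) ↔ k * 2 ≤ i + j :=
    fun k => PySem.Int.le_floordiv_iff_mul_le (by omega)
  have hmeml : ∀ k : Int, k ∈ PySem.List.pyRange (i + 1) (PySem.Int.floordiv (i + j) 2 + 1) 1
      ↔ i + 1 ≤ k ∧ k * 2 ≤ i + j := by
    intro k
    rw [PySem.List.mem_pyRange_one]
    have := hfd k
    omega
  have hfresh : ∀ k ∈ PySem.List.pyRange (i + 1) (PySem.Int.floordiv (i + j) 2 + 1) 1,
      d.contains [i, j, k, i + j - k] = false := by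
    intro k hk
    rw [Bool.eq_false_iff]
    intro hcon
    rw [PySem.Dict.contains_iff_mem_keys] at hcon
    obtain ⟨a, b, c, h1, h2, h3, h4, h5, h6, h7⟩ := (hinv _).mp hcon
    simp only [List.cons.injEq] at h7
    omega
  have hinj : Function.Injective (fun k : Int => [i, j, k, i + j - k]) := by
    intro x y h
    simp only [List.cons.injEq, and_true] at h
    exact h.2.2.1
  have hnodmap : ((PySem.List.pyRange (i + 1) (PySem.Int.floordiv (i + j) 2 + 1) 1).map
      (fun k => [i, j, k, i + j - k])).Nodup :=
    (PySem.List.nodup_pyRange_one _ _).map hinj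
  have hitems := PySem.Dict.items_foldl_insert_fresh
    (l := PySem.List.pyRange (i + 1) (PySem.Int.floordiv (i + j) 2 + 1) 1)
    (k := fun k => [i, j, k, i + j - k]) (v := fun _ => lamb) (d := d) hfresh hnodmap
  have hkeys : ((PySem.List.pyRange (i + 1) (PySem.Int.floordiv (i + j) 2 + 1) 1).foldl
      (fun d k => d.insert [i, j, k, i + j - k] lamb) d).keys =
      d.keys ++ (PySem.List.pyRange (i + 1) (PySem.Int.floordiv (i + j) 2 + 1) 1).map
        (fun k => [i, j, k, i + j - k]) := by
    simp only [PySem.Dict.keys, hitems, List.map_append, List.map_map]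
    rfl
  refine ⟨fun q => ?_, PySem.Dict.nodup_keys_foldl_insert_key _ _ _ _ hnd⟩
  rw [hkeys, List.mem_append]
  constructor
  · rintro (hq | hq)
    · obtain ⟨a, b, c, h1, h2, h3, h4, h5, h6, h7⟩ := (hinv q).mp hq
      exact ⟨a, b, c, h1, h2, h3, by omega, h5, h6, h7⟩
    · obtain ⟨k, hk, hqe⟩ := List.mem_map.mp hq
      have hkb := (hmeml k).mp hk
      exact ⟨i, j, k, hi, hij, hj, by omega, by omega, by omega, hqe.symm⟩
  · rintro ⟨a, b, c, h1, h2, h3, h4, h5, h6, h7⟩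
    by_cases hab : a = i ∧ b = j
    · right
      refine List.mem_map.mpr ⟨c, (hmeml c).mpr (by omega), ?_⟩
      rw [h7, hab.1, hab.2]
    · exact Or.inl ((hinv q).mpr ⟨a, b, c, h1, h2, h3, by omega, h5, h6, h7⟩)

-- the frontier description of the invariant can be rephrased
lemma keyinv_mono (M i j i' j' : Int) (d : PySem.Dict (List Int) Int)
    (h : ∀ a b : Int, 0 ≤ a → a ≤ b → b < M →
      ((a < i ∨ (a = i ∧ b < j)) ↔ (a < i' ∨ (a = i' ∧ b < j'))))
    (hinv : KeyInv M i j d) : KeyInv M i' j' d := by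
  intro q
  rw [hinv q]
  constructor <;> rintro ⟨a, b, c, h1, h2, h3, h4, h5, h6, h7⟩
  · exact ⟨a, b, c, h1, h2, h3, (h a b h1 h2 h3).mp h4, h5, h6, h7⟩
  · exact ⟨a, b, c, h1, h2, h3, (h a b h1 h2 h3).mpr h4, h5, h6, h7⟩

-- the j-loop: A's and B's folds agree and the invariant is carried to (i, M)
lemma jLoop_eq (lamb M i : Int) (hi : 0 ≤ i) : ∀ (n : Nat) (jj : Int), (M - jj).toNat = n →
    ∀ d : PySem.Dict (List Int) Int, i ≤ jj → KeyInv M i jj d → d.keys.Nodup →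
    (PySem.List.pyRange jj M 1).foldl (fun d j =>
      (PySem.List.pyRange 0 M 1).foldl (fun d k =>
        (PySem.List.pyRange k M 1).foldl (fun d l =>
          if (i, j) = (k, l) then d
          else if i + j = k + l then
            (if d.contains [k, l, i, j] then d else d.insert [i, j, k, l] lamb)
          else d) d) d) d =
    (PySem.List.pyRange jj M 1).foldl (fun d j =>
      (PySem.List.pyRange (i + 1) (PySem.Int.floordiv (i + j) 2 + 1) 1).foldl (fun d k =>
        d.insert [i, j, k, i + j - k] lamb) d) d ∧
    KeyInv M i M ((PySem.List.pyRange jj M 1).foldl (fun d j =>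
      (PySem.List.pyRange (i + 1) (PySem.Int.floordiv (i + j) 2 + 1) 1).foldl (fun d k =>
        d.insert [i, j, k, i + j - k] lamb) d) d) ∧
    ((PySem.List.pyRange jj M 1).foldl (fun d j =>
      (PySem.List.pyRange (i + 1) (PySem.Int.floordiv (i + j) 2 + 1) 1).foldl (fun d k =>
        d.insert [i, j, k, i + j - k] lamb) d) d).keys.Nodup := by
  intro n
  induction n with
  | zero =>
    intro jj hn d hij hinv hnd
    rw [pyRange_nil jj M (by omega)]
    exact ⟨rfl, keyinv_mono M i jj i M d (fun a b h1 h2 h3 => by omega) hinv, hnd⟩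
  | succ n ih =>
    intro jj hn d hij hinv hnd
    have hjM : jj < M := by omega
    rw [PySem.List.pyRange_one_cons hjM, List.foldl_cons, List.foldl_cons,
      inner_eq lamb M i jj d hi hij hjM (hq_of_inv M i jj d hij hinv)]
    obtain ⟨hinv', hnd'⟩ := inv_step lamb M i jj d hi hij hjM hinv hnd
    exact ih (jj + 1) (by omega) _ (by omega) hinv' hnd'

-- the i-loop
lemma iLoop_eq (lamb M : Int) : ∀ (n : Nat) (ii : Int), (M - ii).toNat = n →
    ∀ d : PySem.Dict (List Int) Int, 0 ≤ ii → KeyInv M ii ii d → d.keys.Nodup →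
    (PySem.List.pyRange ii M 1).foldl (fun d i =>
      (PySem.List.pyRange i M 1).foldl (fun d j =>
        (PySem.List.pyRange 0 M 1).foldl (fun d k =>
          (PySem.List.pyRange k M 1).foldl (fun d l =>
            if (i, j) = (k, l) then d
            else if i + j = k + l then
              (if d.contains [k, l, i, j] then d else d.insert [i, j, k, l] lamb)
            else d) d) d) d) d =
    (PySem.List.pyRange ii M 1).foldl (fun d i =>
      (PySem.List.pyRange i M 1).foldl (fun d j =>
        (PySem.List.pyRange (i + 1) (PySem.Int.floordiv (i + j) 2 + 1) 1).foldl (fun d k =>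
          d.insert [i, j, k, i + j - k] lamb) d) d) d := by
  intro n
  induction n with
  | zero =>
    intro ii hn d h0 hinv hnd
    rw [pyRange_nil ii M (by omega)]
    rfl
  | succ n ih =>
    intro ii hn d h0 hinv hnd
    have hiM : ii < M := by omega
    rw [PySem.List.pyRange_one_cons hiM, List.foldl_cons, List.foldl_cons]
    obtain ⟨heq, hinv', hnd'⟩ :=
      jLoop_eq lamb M ii h0 (M - ii).toNat ii rfl d le_rfl hinv hnd
    rw [heq]
    exact ih (ii + 1) (by omega) _ (by omega)
      (keyinv_mono M ii M (ii + 1) (ii + 1) _ (fun a b h1 h2 h3 => by omega) hinv') hnd'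

-- ===== VERDICT (by name: the statement is the Claim_ definition above) =====
theorem initialize_couplings_spec : Claim_equal_initialize_couplings := by
  intro lamb M _
  unfold Spec_initialize_couplings initialize_couplings initialize_couplings_alt
  rw [iLoop_eq lamb M M.toNat 0 (by omega) _ le_rfl
    (fun q => by simp [PySem.Dict.keys_empty]; omega) (by simp [PySem.Dict.keys_empty])]
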